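-- pv_equiv track=rewrite | github.com/0Zeta/RockPaperScissors | rpskaggle/agents/geometry_agent.py | find_all_longest
-- ===== SOURCE A (Python) =====
-- import operator
-- from typing import List
-- from collections import namedtuple
--
-- HistMatchResult = namedtuple("HistMatchResult", "idx length")
--
-- def find_all_longest(seq, max_len=None) -> List[HistMatchResult]:
--     """
--     Find all indices where end of `seq` matches some past.
--     """
--     result = []
--     i_search_start = len(seq) - 2
--
--     while i_search_start > 0:
--         i_sub = -1
--         i_search = i_search_start
--         length = 0
--
--         while i_search >= 0 and seq[i_sub] == seq[i_search]:
--             length += 1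
--             i_sub -= 1
--             i_search -= 1
--
--             if max_len is not None and length > max_len:
--                 break
--
--         if length > 0:
--             result.append(HistMatchResult(i_search_start + 1, length))
--
--         i_search_start -= 1
--
--     result = sorted(result, key=operator.attrgetter("length"), reverse=True)
--     return result
-- ===== SOURCE B (Python) =====
-- from typing import List
-- from collections import namedtuple
--
-- HistMatchResult = namedtuple("HistMatchResult", "idx length")
--
-- def find_all_longest(seq, max_len=None) -> List[HistMatchResult]:
--     """
--     Find all indices where end of `seq` matches some past.
--     Z-function on the reversed sequence: O(n) match lengths instead of
--     an O(n^2) per-position rescan, then one stable sort.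
--     """
--     n = len(seq)
--     r = seq[::-1]
--     # z[k] = length of the longest common prefix of r and r[k:]
--     z = [0] * n
--     l = rr = 0
--     for i in range(1, n):
--         zi = min(rr - i, z[i - l]) if i < rr else 0
--         while i + zi < n and r[zi] == r[i + zi]:
--             zi += 1
--         z[i] = zi
--         if i + zi > rr:
--             l, rr = i, i + zi
--     result = []
--     for s in range(n - 2, 0, -1):
--         length = z[n - 1 - s]
--         if max_len is not None:
--             length = min(length, max_len + 1)  # a match past the cap still counts once more
--         if length > 0:
--             result.append(HistMatchResult(s + 1, length))
--     return sorted(result, key=lambda res: res.length, reverse=True)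
-- ===== Notes on version B (the rewrite author's own statement) =====
-- stated objective: faster
-- what changed: B computes all suffix-match lengths at once with a Z-function on the reversed sequence (linear-time window reuse) instead of A's per-position rescan, then does the same stable sort; Pre_ excludes negative max_len (outside the natural domain of a length bound), where A's cap check fires only after a first match.
-- outside the precondition, e.g. on find_all_longest([1, 1, 1], -2): A returns [(2, 1)], B returns []
import Mathlib
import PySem

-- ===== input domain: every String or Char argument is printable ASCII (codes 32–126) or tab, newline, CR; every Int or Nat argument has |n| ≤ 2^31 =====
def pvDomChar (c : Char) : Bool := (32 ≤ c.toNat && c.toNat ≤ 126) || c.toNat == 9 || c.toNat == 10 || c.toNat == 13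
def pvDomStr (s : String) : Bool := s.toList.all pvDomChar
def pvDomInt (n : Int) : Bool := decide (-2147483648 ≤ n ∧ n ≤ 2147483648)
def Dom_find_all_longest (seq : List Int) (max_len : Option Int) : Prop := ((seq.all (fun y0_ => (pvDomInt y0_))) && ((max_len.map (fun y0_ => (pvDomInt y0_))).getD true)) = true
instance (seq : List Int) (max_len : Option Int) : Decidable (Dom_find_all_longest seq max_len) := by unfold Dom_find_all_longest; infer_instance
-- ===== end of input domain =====

-- B replaces A's per-position O(n^2) suffix rescan by a Z-function on the reversed
-- sequence (O(n) match lengths) followed by the same stable sort.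

-- ===== PORT A =====
-- A's inner while loop: `while i_search >= 0 and seq[i_sub] == seq[i_search]: ...`.
-- The isSome conjunct marks where Python indexing would raise; on every state
-- reachable from the entry both indices are in range, so it is never the deciding test.
def pvInnerA (seq : List Int) (i_sub i_search length : Int) (max_len : Option Int) : Int :=
  if h : 0 ≤ i_search ∧ (PySem.List.pyGet? seq i_sub).isSome ∧
      PySem.List.pyGet? seq i_sub = PySem.List.pyGet? seq i_search then
    let length' := length + 1
    if (match max_len with | some m => decide (length' > m) | none => false) then length'
    else pvInnerA seq (i_sub - 1) (i_search - 1) length' max_len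
  else length
termination_by (i_search + 1).toNat
decreasing_by
  have := h.1; omega

-- A's outer while loop, recursion on the value of i_search_start (counts down to 0).
def pvOuterA (seq : List Int) (max_len : Option Int) : Nat → List (Int × Int)
  | 0 => []
  | s + 1 =>
    let iss : Int := (s : Int) + 1
    let length := pvInnerA seq (-1) iss 0 max_len
    (if length > 0 then [(iss + 1, length)] else []) ++ pvOuterA seq max_len s

def find_all_longest (seq : List Int) (max_len : Option Int) : List (Int × Int) :=
  PySem.List.sorted (pvOuterA seq max_len (seq.length - 2)) (fun p => p.2) true

-- ===== PORT B =====
-- B's inner while loop: `while i + zi < n and r[zi] == r[i + zi]: zi += 1`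
-- (all counters provably nonnegative, so ported over Nat; zi ≤ i+zi < n keeps r[zi] in range).
def pvZext (r : List Int) (n i zi : Nat) : Nat :=
  if h : i + zi < n ∧ r.getD zi 0 = r.getD (i + zi) 0 then pvZext r n i (zi + 1) else zi
termination_by n - zi
decreasing_by have := h.1; omega

-- B's for loop over i in range(1, n) computing the z-array (l, rr = window bounds).
def pvZloop (r : List Int) (n i l rr : Nat) (z : List Nat) : List Nat :=
  if _h : i < n then
    let zi0 := if i < rr then min (rr - i) (z.getD (i - l) 0) else 0
    let zi := pvZext r n i zi0
    let z' := z.set i zi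
    if rr < i + zi then pvZloop r n (i + 1) i (i + zi) z'
    else pvZloop r n (i + 1) l rr z'
  else z
termination_by n - i

-- B's result loop over s in range(n-2, 0, -1), recursion on the value of s.
def pvOuterB (z : List Nat) (n : Nat) (max_len : Option Int) : Nat → List (Int × Int)
  | 0 => []
  | s + 1 =>
    let length0 : Int := (z.getD (n - 1 - (s + 1)) 0 : Nat)
    let length : Int := match max_len with | some m => min length0 (m + 1) | none => length0
    (if length > 0 then [((s : Int) + 1 + 1, length)] else []) ++ pvOuterB z n max_len s

def find_all_longest_alt (seq : List Int) (max_len : Option Int) : List (Int × Int) :=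
  let n := seq.length
  let r := seq.reverse   -- seq[::-1]
  let z := pvZloop r n 1 0 0 (List.replicate n 0)
  PySem.List.sorted (pvOuterB z n max_len (n - 2)) (fun p => p.2) true

-- ===== PRECONDITION & SPEC =====
-- Pre_ restricts max_len to the natural domain (None or a nonnegative bound): for a
-- negative max_len A still returns length-1 entries because its cap check runs only
-- after the first match — a negative length bound is outside the task's natural domain.
def Pre_find_all_longest (seq : List Int) (max_len : Option Int) : Prop :=
  0 ≤ max_len.getD 0
instance (seq : List Int) (max_len : Option Int) : Decidable (Pre_find_all_longest seq max_len) := by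
  unfold Pre_find_all_longest; infer_instance

def pvWitness_find_all_longest : List Int × Option Int := ([1, 2, 1, 2], some 1)

def Spec_find_all_longest (seq : List Int) (max_len : Option Int) (out : List (Int × Int)) : Prop := out = find_all_longest_alt seq max_len
instance (seq : List Int) (max_len : Option Int) (out : List (Int × Int)) : Decidable (Spec_find_all_longest seq max_len out) := by unfold Spec_find_all_longest; infer_instance

-- ===== CLAIM (what is proved, stated in full; the proofs are below) =====
def Claim_equal_find_all_longest : Prop := ∀ (seq : List Int) (max_len : Option Int), Dom_find_all_longest seq max_len → Pre_find_all_longest seq max_len → Spec_find_all_longest seq max_len (find_all_longest seq max_len)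

-- ===== LEMMAS AND PROOFS =====

-- Longest common prefix of two lists (proof-side characterisation of a match length).
def pvLcp : List Int → List Int → Nat
  | a :: as, b :: bs => if a = b then pvLcp as bs + 1 else 0
  | _, _ => 0

theorem pvLcp_le_left : ∀ (a b : List Int), pvLcp a b ≤ a.length := by
  intro a; induction a with
  | nil => intro b; cases b <;> simp [pvLcp]
  | cons x xs ih =>
    intro b; cases b with
    | nil => simp [pvLcp]
    | cons y ys => simp only [pvLcp]; split <;> simp; exact ih ys

theorem pvLcp_le_right : ∀ (a b : List Int), pvLcp a b ≤ b.length := by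
  intro a; induction a with
  | nil => intro b; cases b <;> simp [pvLcp]
  | cons x xs ih =>
    intro b; cases b with
    | nil => simp [pvLcp]
    | cons y ys => simp only [pvLcp]; split <;> simp; exact ih ys

theorem pvLcp_eq_get : ∀ (a b : List Int) (j : Nat), j < pvLcp a b → a[j]? = b[j]? := by
  intro a; induction a with
  | nil => intro b j h; cases b <;> simp [pvLcp] at h
  | cons x xs ih =>
    intro b j h; cases b with
    | nil => simp [pvLcp] at h
    | cons y ys =>
      simp only [pvLcp] at h
      split at h
      · cases j with
        | zero => simp_all
        | succ j => simpa using ih ys j (by omega)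
      · omega

theorem pvLcp_mismatch : ∀ (a b : List Int), pvLcp a b < a.length → pvLcp a b < b.length →
    a[pvLcp a b]? ≠ b[pvLcp a b]? := by
  intro a; induction a with
  | nil => intro b h _; simp at h
  | cons x xs ih =>
    intro b ha hb; cases b with
    | nil => simp at hb
    | cons y ys =>
      simp only [pvLcp] at ha hb ⊢
      by_cases heq : x = y
      · simp only [if_pos heq, List.length_cons] at ha hb ⊢
        simpa using ih ys (by omega) (by omega)
      · simp only [if_neg heq]
        simpa using heq
  
theorem pvLcp_ge : ∀ (a b : List Int) (v : Nat), v ≤ a.length → v ≤ b.length →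
    (∀ j, j < v → a[j]? = b[j]?) → v ≤ pvLcp a b := by
  intro a; induction a with
  | nil => intro b v h _ _; simp at h; simp [h, pvLcp]
  | cons x xs ih =>
    intro b v ha hb hj
    cases v with
    | zero => omega
    | succ v =>
      cases b with
      | nil => simp at hb
      | cons y ys =>
        have h0 := hj 0 (by omega)
        simp at h0
        simp only [pvLcp, if_pos h0]
        have := ih ys v (by simpa using ha) (by simpa using hb)
          (fun j hjv => by simpa using hj (j + 1) (by omega))
        omega


-- getD of a list at an in-range index, via getElem?.
theorem pvGetD_eq {α : Type} (l : List α) (k : Nat) (d : α) (h : k < l.length) :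
    l.getD k d = l[k] := by
  simp [List.getD_eq_getElem?_getD, List.getElem?_eq_getElem h]

-- The extension while loop, started at any v that is ≤ the true lcp, ends exactly at the lcp.
theorem pvZext_spec (r : List Int) (i : Nat) :
    ∀ v, v ≤ pvLcp r (r.drop i) → pvZext r r.length i v = pvLcp r (r.drop i) := by
  set L := pvLcp r (r.drop i) with hL
  have hLr : L ≤ r.length := pvLcp_le_left _ _
  have hLd : L ≤ r.length - i := by
    have := pvLcp_le_right r (r.drop i); simpa using this
  have stop : pvZext r r.length i L = L := by
    rw [pvZext, dif_neg]
    rintro ⟨h1, h2⟩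
    have hlt1 : L < r.length := by omega
    have hlt2 : L < (r.drop i).length := by simp; omega
    have hmm := pvLcp_mismatch r (r.drop i) hlt1 hlt2
    apply hmm
    rw [List.getElem?_drop, List.getElem?_eq_getElem hlt1, List.getElem?_eq_getElem (by omega : i + L < r.length)]
    rw [pvGetD_eq r L 0 hlt1, pvGetD_eq r (i + L) 0 (by omega)] at h2
    simpa using h2
  have key : ∀ fuel v, L - v ≤ fuel → v ≤ L → pvZext r r.length i v = L := by
    intro fuel
    induction fuel with
    | zero =>
      intro v hf hv
      have hvL : v = L := by omega
      subst hvL; exact stop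
    | succ fuel ih =>
      intro v hf hv
      by_cases hvL : v = L
      · subst hvL; exact stop
      · have hvlt : v < L := by omega
        have hget := pvLcp_eq_get r (r.drop i) v (by omega)
        have hiv : i + v < r.length := by omega
        have hvr : v < r.length := by omega
        rw [List.getElem?_drop] at hget
        rw [pvZext, dif_pos]
        · exact ih (v + 1) (by omega) (by omega)
        · refine ⟨hiv, ?_⟩
          rw [pvGetD_eq r v 0 hvr, pvGetD_eq r (i + v) 0 hiv]
          rw [List.getElem?_eq_getElem hvr, List.getElem?_eq_getElem hiv] at hget
          simpa using hget
  intro v hv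
  exact key (L - v) v (by omega) hv

-- Correctness of the z-array loop: every computed entry is the lcp of r with its suffix.
theorem pvZloop_spec (r : List Int) :
    ∀ fuel i l rr (z : List Nat),
      r.length - i ≤ fuel →
      1 ≤ i →
      z.length = r.length →
      (∀ k, 1 ≤ k → k < i → z.getD k 0 = pvLcp r (r.drop k)) →
      (rr ≤ i ∨ (1 ≤ l ∧ l < i)) →
      l ≤ rr → rr ≤ r.length →
      rr - l ≤ pvLcp r (r.drop l) →
      ∀ k, 1 ≤ k → k < r.length →
        (pvZloop r r.length i l rr z).getD k 0 = pvLcp r (r.drop k) := by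
  intro fuel
  induction fuel with
  | zero =>
    intro i l rr z hf hi1 hlen hgood hwin1 hwin2 hwin3 hwin4 k hk1 hk2
    rw [pvZloop, dif_neg (by omega)]
    exact hgood k hk1 (by omega)
  | succ fuel ih =>
    intro i l rr z hf hi1 hlen hgood hwin1 hwin2 hwin3 hwin4 k hk1 hk2
    by_cases hi : i < r.length
    · -- the start value is a valid lower bound for the lcp at i
      have hzi0 : (if i < rr then min (rr - i) (z.getD (i - l) 0) else 0) ≤ pvLcp r (r.drop i) := by
        split
        · next hir =>
          rcases hwin1 with h | ⟨hl1, hli⟩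
          · omega
          · have hz : z.getD (i - l) 0 = pvLcp r (r.drop (i - l)) :=
              hgood (i - l) (by omega) (by omega)
            rw [hz]
            apply pvLcp_ge
            · omega
            · simp; omega
            · intro j hj
              have h1 : r[j]? = r[(i - l) + j]? := by
                have := pvLcp_eq_get r (r.drop (i - l)) j (by omega)
                rwa [List.getElem?_drop] at this
              have h2 : r[(i - l) + j]? = r[i + j]? := by
                have ht : (i - l) + j < pvLcp r (r.drop l) := by omega
                have := pvLcp_eq_get r (r.drop l) ((i - l) + j) ht
                rw [List.getElem?_drop] at this
                rw [this]
                congr 1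
                omega
              rw [List.getElem?_drop, h1, h2]
        · exact Nat.zero_le _
      have hzi : pvZext r r.length i (if i < rr then min (rr - i) (z.getD (i - l) 0) else 0)
          = pvLcp r (r.drop i) := pvZext_spec r i _ hzi0
      have hLd : pvLcp r (r.drop i) ≤ r.length - i := by
        have := pvLcp_le_right r (r.drop i); simpa using this
      have hgood' : ∀ k', 1 ≤ k' → k' < i + 1 →
          (z.set i (pvLcp r (r.drop i))).getD k' 0 = pvLcp r (r.drop k') := by
        intro k' hk'1 hk'2
        by_cases hk'i : k' = i
        · subst hk'i
          rw [List.getD_eq_getElem?_getD, List.getElem?_set_self (by omega)]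
          simp
        · rw [List.getD_eq_getElem?_getD, List.getElem?_set_ne (by omega), ← List.getD_eq_getElem?_getD]
          exact hgood k' hk'1 (by omega)
      rw [pvZloop, dif_pos hi]
      simp only [hzi]
      split
      · next hnew =>
        exact ih (i + 1) i (i + pvLcp r (r.drop i)) _ (by omega) (by omega)
          (by simpa using hlen) hgood' (by omega) (by omega) (by omega) (by omega) k hk1 hk2
      · next hold =>
        exact ih (i + 1) l rr _ (by omega) (by omega) (by simpa using hlen) hgood'
          (by omega) hwin2 hwin3 hwin4 k hk1 hk2
    · rw [pvZloop, dif_neg hi]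
      exact hgood k hk1 (by omega)

-- A's inner while loop computes the (possibly capped) lcp of the reversed sequence
-- with its suffix starting at k = n-1-s: state at step t is (i_sub, i_search, length)
-- = (-(t+1), s-t, t).
theorem pvInnerA_step (seq : List Int) (s : Nat) (ml : Option Int)
    (hs1 : 1 ≤ s) (hs2 : s + 2 ≤ seq.length) :
    ∀ fuel t, pvLcp seq.reverse (seq.reverse.drop (seq.length - 1 - s)) - t ≤ fuel →
      t ≤ pvLcp seq.reverse (seq.reverse.drop (seq.length - 1 - s)) →
      (∀ m, ml = some m → (t : Int) ≤ m) →
      pvInnerA seq (-((t : Int) + 1)) ((s : Int) - t) t ml =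
        (match ml with
         | some m => min (pvLcp seq.reverse (seq.reverse.drop (seq.length - 1 - s)) : Int) (m + 1)
         | none => (pvLcp seq.reverse (seq.reverse.drop (seq.length - 1 - s)) : Int)) := by
  set n := seq.length with hn
  set r := seq.reverse with hr
  set k := n - 1 - s with hk
  set L := pvLcp r (r.drop k) with hL
  have hrlen : r.length = n := by rw [hr, hn]; simp
  have hLs : L ≤ s + 1 := by
    have := pvLcp_le_right r (r.drop k)
    simp [hrlen] at this
    omega
  -- the two Python subscripts agree with the reversed list
  have eA : ∀ t : Nat, t < n → PySem.List.pyGet? seq (-((t : Int) + 1)) = r[t]? := by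
    intro t ht
    have h1 : -((t : Int) + 1) = -(((t + 1 : Nat) : Int)) := by push_cast; ring
    rw [h1, PySem.List.pyGet?_neg_natCast seq (t + 1) (by omega) (by omega)]
    rw [hr, List.getElem?_reverse (by omega)]
    congr 1
    omega
  have eB : ∀ t : Nat, t ≤ s → PySem.List.pyGet? seq ((s : Int) - t) = r[k + t]? := by
    intro t ht
    have h1 : (s : Int) - t = ((s - t : Nat) : Int) := by omega
    rw [h1, PySem.List.pyGet?_natCast seq (s - t)]
    rw [hr, List.getElem?_reverse (by omega)]
    congr 1
    omega
  intro fuel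
  induction fuel with
  | zero =>
    intro t hf ht hinv
    have htL : t = L := by omega
    subst htL
    rw [pvInnerA, dif_neg]
    · rcases ml with _ | m
      · simp
      · have := hinv m rfl
        simp only
        omega
    · rintro ⟨h1, h2, h3⟩
      have hts : L ≤ s := by
        by_contra hgt
        have : (s : Int) - L < 0 := by omega
        omega
      have hLn : L < r.length := by omega
      have hLd : L < (r.drop k).length := by simp [hrlen]; omega
      have hmm := pvLcp_mismatch r (r.drop k) hLn hLd
      rw [← hL] at hmm
      apply hmm
      rw [List.getElem?_drop]
      rw [eA L (by omega), eB L hts] at h3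
      exact h3
  | succ fuel ih =>
    intro t hf ht hinv
    by_cases htL : t = L
    · subst htL
      rw [pvInnerA, dif_neg]
      · rcases ml with _ | m
        · simp
        · have := hinv m rfl
          simp only
          omega
      · rintro ⟨h1, h2, h3⟩
        have hts : L ≤ s := by
          by_contra hgt
          have : (s : Int) - L < 0 := by omega
          omega
        have hLn : L < r.length := by omega
        have hLd : L < (r.drop k).length := by simp [hrlen]; omega
        have hmm := pvLcp_mismatch r (r.drop k) hLn hLd
        rw [← hL] at hmm
        apply hmm
        rw [List.getElem?_drop]
        rw [eA L (by omega), eB L hts] at h3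
        exact h3
    · have htlt : t < L := by omega
      have hts : t ≤ s := by omega
      have htn : t < n := by omega
      have hkt : k + t < n := by omega
      have heq : r[t]? = r[k + t]? := by
        have := pvLcp_eq_get r (r.drop k) t (by omega)
        rwa [List.getElem?_drop] at this
      rw [pvInnerA, dif_pos]
      · simp only
        rcases ml with _ | m
        · simp only [Bool.false_eq_true, if_false]
          have := ih (t + 1) (by omega) (by omega) (by simp)
          convert this using 2 <;> push_cast <;> ring
        · by_cases hbrk : (t : Int) + 1 > m
          · rw [if_pos (by simpa using hbrk)]
            have htm : (t : Int) = m := by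
              have := hinv m rfl
              omega
            have hm1L : (m : Int) + 1 ≤ (L : Int) := by omega
            simp only
            omega
          · rw [if_neg (by simpa using hbrk)]
            have := ih (t + 1) (by omega) (by omega)
              (by intro m' hm'; cases hm'; omega)
            convert this using 2 <;> push_cast <;> ring
      · refine ⟨by omega, ?_, ?_⟩
        · have htn' : t < seq.length := by omega
          rw [eA t htn, hr, List.getElem?_reverse htn',
            List.getElem?_eq_getElem (show seq.length - 1 - t < seq.length by omega)]
          simp
        · rw [eA t htn, eB t hts, heq]


-- The z-array produced by B's loop, as called from the entry point.
theorem pvZfinal (seq : List Int) :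
    ∀ k, 1 ≤ k → k < seq.length →
      (pvZloop seq.reverse seq.length 1 0 0 (List.replicate seq.length 0)).getD k 0
        = pvLcp seq.reverse (seq.reverse.drop k) := by
  intro k h1 h2
  have hr : seq.reverse.length = seq.length := by simp
  have := pvZloop_spec seq.reverse seq.reverse.length 1 0 0 (List.replicate seq.length 0)
    (by omega) (by omega) (by simp)
    (by intro k hk1 hk2; omega)
    (Or.inl (by omega)) (by omega) (by omega) (by omega)
    k h1 (by omega)
  rwa [hr] at this

-- The two result-building loops agree entry by entry.
theorem pvOuter_eq (seq : List Int) (ml : Option Int) (hml : 0 ≤ ml.getD 0) :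
    ∀ s, s + 2 ≤ seq.length →
      pvOuterA seq ml s =
        pvOuterB (pvZloop seq.reverse seq.length 1 0 0 (List.replicate seq.length 0))
          seq.length ml s := by
  intro s
  induction s with
  | zero => intro _; rfl
  | succ s ih =>
    intro hs
    have h0 := pvInnerA_step seq (s + 1) ml (by omega) (by omega)
      (pvLcp seq.reverse (seq.reverse.drop (seq.length - 1 - (s + 1)))) 0
      (by omega) (by omega)
      (by intro m hm; subst hm; simpa using hml)
    push_cast at h0
    norm_num at h0
    have hB : (pvZloop seq.reverse seq.length 1 0 0 (List.replicate seq.length 0)).getD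
        (seq.length - 1 - (s + 1)) 0
        = pvLcp seq.reverse (seq.reverse.drop (seq.length - 1 - (s + 1))) :=
      pvZfinal seq (seq.length - 1 - (s + 1)) (by omega) (by omega)
    simp only [pvOuterA, pvOuterB, h0, hB, ih (by omega)]


-- ===== VERDICT (by name: the statement is the Claim_ definition above) =====
theorem find_all_longest_spec : Claim_equal_find_all_longest := by
  intro seq ml _hdom hpre
  unfold Spec_find_all_longest find_all_longest find_all_longest_alt
  simp only []
  congr 1
  by_cases h3 : 3 ≤ seq.length
  · exact pvOuter_eq seq ml hpre (seq.length - 2) (by omega)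
  · rw [show seq.length - 2 = 0 from by omega]
    rfl
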